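-- pv_equiv track=rewrite | github.com/qwer-1234-q/UNSWMATH3411 | Chapter67/Vigenere.py | unknown_pla_cip
-- ===== SOURCE A (Python) =====
-- def unknown_pla_cip(message, key, i, num, pla_cip_m, pla_cip, non_alpha_count):
-- 	if i < num:
-- 		letter = message[i]
-- 		if letter.isalpha():
-- 			letter.upper()
-- 			chart = ""
-- 			if pla_cip == 0:
-- 				offset = ord(key[(i - non_alpha_count) % len(key)]) - ord('A')
-- 				chart = chr((ord(letter) - ord('A') + offset) % 26 + ord('A'))
-- 			elif pla_cip == 1:
-- 				chart = chr((ord(letter) - ord(key[i - non_alpha_count])) % 26 + ord("A"))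
-- 			pla_cip_m += chart
-- 			if len(key) < num:
-- 				key.append(chart)
-- 		else:
-- 			pla_cip_m += letter
-- 			non_alpha_count += 1
-- 		return unknown_pla_cip(message, key, i + 1, num, pla_cip_m, pla_cip,
-- 		                       non_alpha_count)
-- 	else:
-- 		return key, pla_cip_m
-- ===== SOURCE B (Python) =====
-- def unknown_pla_cip(message, key, i, num, pla_cip_m, pla_cip, non_alpha_count):
--     for j in range(i, num):
--         letter = message[j]
--         if letter.isalpha():
--             chart = ""
--             if pla_cip == 0:
--                 offset = ord(key[(j - non_alpha_count) % len(key)]) - ord('A')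
--                 chart = chr((ord(letter) - ord('A') + offset) % 26 + ord('A'))
--             elif pla_cip == 1:
--                 chart = chr((ord(letter) - ord(key[j - non_alpha_count])) % 26 + ord('A'))
--             pla_cip_m += chart
--             if len(key) < num:
--                 key.append(chart)
--         else:
--             pla_cip_m += letter
--             non_alpha_count += 1
--     return key, pla_cip_m
-- ===== Notes on version B (the rewrite author's own statement) =====
-- stated objective: idiomatic
-- what changed: The tail recursion over the cursor i is replaced by an iterative for-loop over range(i, num) with local accumulators (and the no-op letter.upper() dropped); the per-character cipher logic is unchanged.
import Mathlib
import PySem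

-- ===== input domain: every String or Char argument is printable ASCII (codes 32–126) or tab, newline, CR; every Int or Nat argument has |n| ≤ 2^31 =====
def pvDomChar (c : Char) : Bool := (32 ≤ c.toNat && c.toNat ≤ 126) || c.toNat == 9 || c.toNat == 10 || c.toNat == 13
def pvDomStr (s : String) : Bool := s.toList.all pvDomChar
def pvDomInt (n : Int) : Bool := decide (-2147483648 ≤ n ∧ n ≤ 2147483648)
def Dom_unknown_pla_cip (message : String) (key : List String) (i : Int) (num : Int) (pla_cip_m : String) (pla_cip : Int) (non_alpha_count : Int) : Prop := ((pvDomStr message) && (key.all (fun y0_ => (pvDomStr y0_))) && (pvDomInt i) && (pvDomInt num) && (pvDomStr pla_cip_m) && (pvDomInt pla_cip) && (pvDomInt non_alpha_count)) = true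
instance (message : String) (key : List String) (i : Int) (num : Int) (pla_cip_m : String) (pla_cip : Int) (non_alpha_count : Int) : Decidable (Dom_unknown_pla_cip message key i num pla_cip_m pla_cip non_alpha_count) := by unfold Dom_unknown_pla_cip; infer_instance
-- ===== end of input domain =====

-- B replaces A's tail recursion over the cursor i by an iterative loop over range(i, num)
-- (and drops the no-op letter.upper()); per-character logic unchanged.  Both Pythons append
-- to the caller's key list in the same way, so the in-place mutation of `key` also agrees.

-- ===== PORT A =====
-- ord(s) for a string s: Python raises TypeError unless s has exactly one character;
-- Pre_ excludes those inputs, the default 65 is never reached inside Pre_.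
def pvOrd (s : String) : Int :=
  match s.toList with
  | [c] => (c.toNat : Int)
  | _ => 65

-- chr(n % 26 + ord('A')): exact, the code point is always in 65..90.
def pvChrA (n : Int) : String := String.ofList [Char.ofNat (PySem.Int.mod n 26 + 65).toNat]

def unknown_pla_cip (message : String) (key : List String) (i : Int) (num : Int) (pla_cip_m : String) (pla_cip : Int) (non_alpha_count : Int) : List String × String :=
  if h : i < num then
    -- letter = message[i]; default never reached inside Pre_ (index in range)
    let letter : Char := (PySem.Str.pyGet? message i).getD 'A'
    if PySem.Chars.isalpha letter then
      -- letter.upper() in the source is a no-op (result discarded)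
      let chart : String :=
        if pla_cip = 0 then
          let offset := pvOrd ((PySem.List.pyGet? key (PySem.Int.mod (i - non_alpha_count) (key.length : Int))).getD "A") - 65
          pvChrA ((letter.toNat : Int) - 65 + offset)
        else if pla_cip = 1 then
          pvChrA ((letter.toNat : Int) - pvOrd ((PySem.List.pyGet? key (i - non_alpha_count)).getD "A"))
        else ""
      let pla_cip_m' := pla_cip_m ++ chart
      let key' := if (key.length : Int) < num then key ++ [chart] else key
      unknown_pla_cip message key' (i + 1) num pla_cip_m' pla_cip non_alpha_count
    else
      unknown_pla_cip message key (i + 1) num (pla_cip_m.push letter) pla_cip (non_alpha_count + 1)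
  else (key, pla_cip_m)
termination_by (num - i).toNat
decreasing_by all_goals omega

-- ===== PORT B =====
-- one iteration of B's for-loop; state = (key, pla_cip_m, non_alpha_count)
def pvStep (message : String) (num : Int) (pla_cip : Int) (st : List String × String × Int) (j : Int) : List String × String × Int :=
  let letter : Char := (PySem.Str.pyGet? message j).getD 'A'
  if PySem.Chars.isalpha letter then
    let chart : String :=
      if pla_cip = 0 then
        let offset := pvOrd ((PySem.List.pyGet? st.1 (PySem.Int.mod (j - st.2.2) (st.1.length : Int))).getD "A") - 65
        pvChrA ((letter.toNat : Int) - 65 + offset)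
      else if pla_cip = 1 then
        pvChrA ((letter.toNat : Int) - pvOrd ((PySem.List.pyGet? st.1 (j - st.2.2)).getD "A"))
      else ""
    (if (st.1.length : Int) < num then st.1 ++ [chart] else st.1, st.2.1 ++ chart, st.2.2)
  else (st.1, st.2.1.push letter, st.2.2 + 1)

def unknown_pla_cip_alt (message : String) (key : List String) (i : Int) (num : Int) (pla_cip_m : String) (pla_cip : Int) (non_alpha_count : Int) : List String × String :=
  let st := (PySem.List.pyRange i num 1).foldl (pvStep message num pla_cip) (key, pla_cip_m, non_alpha_count)
  (st.1, st.2.1)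

-- ===== PRECONDITION & SPEC =====
-- character the Python reads at cursor j (negative j wraps from the end, as in Python)
def pvCharAt (msg : List Char) (j : Int) : Char := (PySem.List.pyGet? msg j).getD 'A'
-- number of non-alphabetic characters read at cursors a..b-1
def pvNonAlphaBetween (msg : List Char) (a b : Int) : Int :=
  (((PySem.List.pyRange a b 1).countP (fun t => !(PySem.Chars.isalpha (pvCharAt msg t)))) : Int)
-- length of the key list when the loop reaches a step preceded by aj alphabetic steps
def pvLenAt (key0 num aj : Int) : Int := if num ≤ key0 then key0 else min num (key0 + aj)
-- key index taken at cursor j, and the key's length when the loop reaches cursor j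
def pvIdx (msg : List Char) (i nac j : Int) : Int := j - nac - pvNonAlphaBetween msg i j
def pvL (msg : List Char) (key0 num i j : Int) : Int := pvLenAt key0 num ((j - i) - pvNonAlphaBetween msg i j)
-- the key element at (in-range) index n is a single character, unless it was appended by the
-- loop itself (n ≥ |key|), in which case it always is
def pvElemOk (key : List String) (n : Int) : Bool :=
  decide ((key.length : Int) ≤ n) || (((PySem.List.pyGet? key n).getD "").toList.length == 1)

-- Pre_ holds exactly where the Python A returns: every cursor in range(i, num) reads inside the
-- message, and (for pla_cip 0/1) every key index taken is in range with a one-character entry —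
-- otherwise A raises IndexError, ZeroDivisionError or TypeError(ord).
def Pre_unknown_pla_cip (message : String) (key : List String) (i : Int) (num : Int) (pla_cip_m : String) (pla_cip : Int) (non_alpha_count : Int) : Prop :=
  i < num →
    (-(message.toList.length : Int) ≤ i ∧ num ≤ (message.toList.length : Int) ∧
     ∀ j ∈ PySem.List.pyRange i num 1,
       PySem.Chars.isalpha (pvCharAt message.toList j) = true →
         ((pla_cip = 0 →
             0 < pvL message.toList (key.length : Int) num i j ∧
             pvElemOk key (PySem.Int.mod (pvIdx message.toList i non_alpha_count j)
                                         (pvL message.toList (key.length : Int) num i j)) = true) ∧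
          (pla_cip = 1 →
             -(pvL message.toList (key.length : Int) num i j) ≤ pvIdx message.toList i non_alpha_count j ∧
             pvIdx message.toList i non_alpha_count j < pvL message.toList (key.length : Int) num i j ∧
             pvElemOk key (if pvIdx message.toList i non_alpha_count j < 0
                           then pvIdx message.toList i non_alpha_count j + pvL message.toList (key.length : Int) num i j
                           else pvIdx message.toList i non_alpha_count j) = true)))
instance (message : String) (key : List String) (i : Int) (num : Int) (pla_cip_m : String) (pla_cip : Int) (non_alpha_count : Int) : Decidable (Pre_unknown_pla_cip message key i num pla_cip_m pla_cip non_alpha_count) := by unfold Pre_unknown_pla_cip; infer_instance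

def pvWitness_unknown_pla_cip : String × List String × Int × Int × String × Int × Int :=
  ("ab cD", ["K", "E", "Y"], 0, 5, "", 0, 0)

def Spec_unknown_pla_cip (message : String) (key : List String) (i : Int) (num : Int) (pla_cip_m : String) (pla_cip : Int) (non_alpha_count : Int) (out : List String × String) : Prop := out = unknown_pla_cip_alt message key i num pla_cip_m pla_cip non_alpha_count
instance (message : String) (key : List String) (i : Int) (num : Int) (pla_cip_m : String) (pla_cip : Int) (non_alpha_count : Int) (out : List String × String) : Decidable (Spec_unknown_pla_cip message key i num pla_cip_m pla_cip non_alpha_count out) := by unfold Spec_unknown_pla_cip; infer_instance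

-- ===== CLAIM (what is proved, stated in full; the proofs are below) =====
def Claim_equal_unknown_pla_cip : Prop := ∀ (message : String) (key : List String) (i : Int) (num : Int) (pla_cip_m : String) (pla_cip : Int) (non_alpha_count : Int), Dom_unknown_pla_cip message key i num pla_cip_m pla_cip non_alpha_count → Pre_unknown_pla_cip message key i num pla_cip_m pla_cip non_alpha_count → Spec_unknown_pla_cip message key i num pla_cip_m pla_cip non_alpha_count (unknown_pla_cip message key i num pla_cip_m pla_cip non_alpha_count)

-- ===== LEMMAS AND PROOFS =====
lemma alt_nil (message : String) (key : List String) (i num : Int) (m : String) (pla_cip nac : Int)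
    (h : ¬ i < num) :
    unknown_pla_cip_alt message key i num m pla_cip nac = (key, m) := by
  simp [unknown_pla_cip_alt, PySem.List.pyRange_one_eq_nil (by omega : num ≤ i)]

lemma alt_cons (message : String) (key : List String) (i num : Int) (m : String) (pla_cip nac : Int)
    (h : i < num) :
    unknown_pla_cip_alt message key i num m pla_cip nac =
      (let st := pvStep message num pla_cip (key, m, nac) i
       unknown_pla_cip_alt message st.1 (i + 1) num st.2.1 pla_cip st.2.2) := by
  simp only [unknown_pla_cip_alt, PySem.List.pyRange_one_cons h, List.foldl_cons]

lemma a_eq_alt (message : String) (num pla_cip : Int) :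
    ∀ (fuel : Nat) (i : Int), (num - i).toNat = fuel → ∀ (key : List String) (m : String) (nac : Int),
      unknown_pla_cip message key i num m pla_cip nac =
      unknown_pla_cip_alt message key i num m pla_cip nac := by
  intro fuel
  induction fuel with
  | zero =>
    intro i hf key m nac
    have h : ¬ i < num := by omega
    rw [unknown_pla_cip, dif_neg h, alt_nil message key i num m pla_cip nac h]
  | succ n ih =>
    intro i hf key m nac
    have h : i < num := by omega
    rw [unknown_pla_cip, dif_pos h, alt_cons message key i num m pla_cip nac h]
    simp only [pvStep]
    by_cases ha : PySem.Chars.isalpha ((PySem.Str.pyGet? message i).getD 'A')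
    · simp only [ha, if_true]
      exact ih (i + 1) (by omega) _ _ _
    · simp only [ha, Bool.false_eq_true, if_false]
      exact ih (i + 1) (by omega) _ _ _

-- ===== VERDICT (by name: the statement is the Claim_ definition above) =====
theorem unknown_pla_cip_spec : Claim_equal_unknown_pla_cip := by
  intro message key i num m pla_cip nac _ _
  unfold Spec_unknown_pla_cip
  exact a_eq_alt message num pla_cip (num - i).toNat i rfl key m nac
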